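-- pv_equiv track=rewrite | github.com/ljialin/fairness-web | src/utils.py | get_rgb_hex
-- ===== SOURCE A (Python) =====
-- def get_rgb_hex(*rgb):
--     assert len(rgb) == 3 and max(rgb) <= 255 and min(rgb) >= 0
--     res = ''
--     for item in rgb:
--         temp = hex(item)
--         if len(temp) == 4:
--             res += temp[2:]
--         else:
--             res += f'0{temp[2]}'
--     return res
-- ===== SOURCE B (Python) =====
-- def get_rgb_hex(*rgb):
--     assert len(rgb) == 3 and max(rgb) <= 255 and min(rgb) >= 0
--     return bytes(rgb).hex()
-- ===== Notes on version B (the rewrite author's own statement) =====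
-- stated objective: idiomatic
-- what changed: Replaces the per-component loop with hex()-string slicing/padding branches by building a 3-byte buffer and converting it to lowercase hex in one bytes(rgb).hex() call.
import Mathlib
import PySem

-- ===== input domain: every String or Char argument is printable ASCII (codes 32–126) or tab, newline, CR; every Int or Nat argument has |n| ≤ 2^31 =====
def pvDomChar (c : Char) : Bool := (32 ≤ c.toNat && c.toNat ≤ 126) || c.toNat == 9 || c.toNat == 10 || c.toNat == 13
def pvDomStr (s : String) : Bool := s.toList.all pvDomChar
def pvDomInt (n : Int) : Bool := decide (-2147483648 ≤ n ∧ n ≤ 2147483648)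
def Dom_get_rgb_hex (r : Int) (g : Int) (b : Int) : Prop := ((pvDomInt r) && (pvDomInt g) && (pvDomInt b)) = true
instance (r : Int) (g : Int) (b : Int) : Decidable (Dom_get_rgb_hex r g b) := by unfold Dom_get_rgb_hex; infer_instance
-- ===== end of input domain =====

-- B replaces A's per-component hex()+padding loop by one bytes(rgb).hex() conversion (idiomatic).

-- ===== PORT A =====
-- hex(n) as a char list, for n ≥ 0 (Pre_ excludes negatives): '0x' followed by lowercase hex digits
def pvHexChars (n : Int) : List Char := '0' :: 'x' :: Nat.toDigits 16 n.toNat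

-- A's loop body: temp = hex(item); if len(temp) == 4 then temp[2:] else f'0{temp[2]}'
-- exact on the admitted inputs: temp always has length ≥ 3, so temp[2:] = drop 2 and temp[2] = getD 2
def pvPieceA (item : Int) : List Char :=
  let temp := pvHexChars item
  if temp.length = 4 then temp.drop 2 else ['0', temp.getD 2 ' ']

def get_rgb_hex (r : Int) (g : Int) (b : Int) : String :=
  String.mk (([r, g, b]).foldl (fun res item => res ++ pvPieceA item) [])

-- ===== PORT B =====
-- one byte of bytes.hex(): two lowercase hex digits (Nat.digitChar is lowercase for 10..15)
def pvByteHex (n : Int) : List Char := [Nat.digitChar (n.toNat / 16), Nat.digitChar (n.toNat % 16)]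

-- bytes(rgb).hex(): hex-format each byte of the buffer and concatenate
def get_rgb_hex_alt (r : Int) (g : Int) (b : Int) : String :=
  String.mk (([r, g, b].map pvByteHex).flatten)

-- ===== PRECONDITION & SPEC =====
-- A's assert raises AssertionError unless every component is in 0..255
def Pre_get_rgb_hex (r : Int) (g : Int) (b : Int) : Prop :=
  (0 ≤ r ∧ r ≤ 255) ∧ (0 ≤ g ∧ g ≤ 255) ∧ (0 ≤ b ∧ b ≤ 255)
instance (r : Int) (g : Int) (b : Int) : Decidable (Pre_get_rgb_hex r g b) := by
  unfold Pre_get_rgb_hex; infer_instance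

def pvWitness_get_rgb_hex : Int × Int × Int := (0, 16, 255)

def Spec_get_rgb_hex (r : Int) (g : Int) (b : Int) (out : String) : Prop := out = get_rgb_hex_alt r g b
instance (r : Int) (g : Int) (b : Int) (out : String) : Decidable (Spec_get_rgb_hex r g b out) := by
  unfold Spec_get_rgb_hex; infer_instance

-- ===== CLAIM (what is proved, stated in full; the proofs are below) =====
def Claim_equal_get_rgb_hex : Prop := ∀ (r : Int) (g : Int) (b : Int), Dom_get_rgb_hex r g b → Pre_get_rgb_hex r g b → Spec_get_rgb_hex r g b (get_rgb_hex r g b)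

-- ===== LEMMAS AND PROOFS =====
set_option maxRecDepth 4000 in
theorem pvPieceA_eq_nat : ∀ m : Nat, m < 256 → pvPieceA (m : Int) = pvByteHex (m : Int) := by
  decide

theorem pvPieceA_eq (n : Int) (h0 : 0 ≤ n) (h1 : n ≤ 255) : pvPieceA n = pvByteHex n := by
  have h : n = ((n.toNat : Nat) : Int) := (Int.toNat_of_nonneg h0).symm
  rw [h]
  exact pvPieceA_eq_nat n.toNat (by omega)

-- ===== VERDICT (by name: the statement is the Claim_ definition above) =====
theorem get_rgb_hex_spec : Claim_equal_get_rgb_hex := by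
  intro r g b _ hpre
  obtain ⟨⟨hr0, hr1⟩, ⟨hg0, hg1⟩, ⟨hb0, hb1⟩⟩ := hpre
  unfold Spec_get_rgb_hex get_rgb_hex get_rgb_hex_alt
  simp [List.foldl, List.map, List.flatten,
    pvPieceA_eq r hr0 hr1, pvPieceA_eq g hg0 hg1, pvPieceA_eq b hb0 hb1]
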